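-- pv_equiv track=rewrite | github.com/doobMM/hibari_tda | tda_pipeline/module_generation.py | split_into_modules
-- ===== SOURCE A (Python) =====
-- from typing import List, Tuple, Dict, Optional
--
-- MODULE_SIZE = 32  # 4마디 x 8 eighth notes
--
-- def split_into_modules(notes: List[Tuple[int, int, int]],
--                        total_time: int,
--                        module_size: int = MODULE_SIZE
--                        ) -> List[List[Tuple[int, int, int]]]:
--     """
--     note 리스트를 모듈 단위로 분할합니다.
--
--     각 모듈의 note는 시작 시점이 모듈 내부로 오프셋됩니다.
--     예: module 3의 note (start=100, pitch, end=102)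
--         → (100-96=4, pitch, min(102-96, 32)=6)
--
--     Args:
--         notes: [(start, pitch, end), ...] 전체 곡 note
--         total_time: 전체 시간축 길이
--         module_size: 모듈 길이 (기본 32)
--
--     Returns:
--         [module_0_notes, module_1_notes, ...] 각 모듈의 note 리스트
--     """
--     n_modules = total_time // module_size
--     modules = [[] for _ in range(n_modules)]
--
--     for s, p, e in notes:
--         m_idx = s // module_size
--         if m_idx >= n_modules:
--             continue
--         # 모듈 내부 오프셋으로 변환
--         m_start = s - m_idx * module_size
--         m_end = min(e - m_idx * module_size, module_size)
--         if m_end > m_start: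
--             modules[m_idx].append((m_start, p, m_end))
--
--     return modules
-- ===== SOURCE B (Python) =====
-- MODULE_SIZE = 32  # 4마디 x 8 eighth notes
--
-- def split_into_modules(notes, total_time, module_size=MODULE_SIZE):
--     n_modules = total_time // module_size
--     return [
--         [(s - m * module_size, p, min(e - m * module_size, module_size))
--          for s, p, e in notes
--          if s // module_size == m
--          and min(e - m * module_size, module_size) > s - m * module_size]
--         for m in range(n_modules)
--     ]
-- ===== Notes on version B (the rewrite author's own statement) =====
-- stated objective: alternative
-- what changed: A single-pass buckets notes into a preallocated module list by indexed append; B instead loops over module indices and, per module, selects and offsets the matching notes in one comprehension (repeated scan, no mutable bucket array).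
-- outside the precondition, e.g. on split_into_modules([(-1, 5, 100)], 64, 32): A returns [[], [(31, 5, 32)]], B returns [[], []]; on split_into_modules([], 64, 0): A raises ZeroDivisionError, B raises ZeroDivisionError
import Mathlib
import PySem

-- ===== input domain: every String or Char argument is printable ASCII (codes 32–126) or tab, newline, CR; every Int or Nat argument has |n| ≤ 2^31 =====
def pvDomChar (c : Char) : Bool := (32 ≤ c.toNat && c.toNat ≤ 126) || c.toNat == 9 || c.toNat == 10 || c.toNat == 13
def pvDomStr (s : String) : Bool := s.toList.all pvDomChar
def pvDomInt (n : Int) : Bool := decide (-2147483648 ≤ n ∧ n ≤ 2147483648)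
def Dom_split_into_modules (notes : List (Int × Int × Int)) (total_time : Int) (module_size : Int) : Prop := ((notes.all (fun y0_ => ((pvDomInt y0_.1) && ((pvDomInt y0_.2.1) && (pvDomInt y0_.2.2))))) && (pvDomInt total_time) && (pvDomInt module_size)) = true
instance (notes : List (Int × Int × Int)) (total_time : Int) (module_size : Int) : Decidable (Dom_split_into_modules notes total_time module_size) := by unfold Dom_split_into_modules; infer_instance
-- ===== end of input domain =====

-- B restructures the bucketing as an outer loop over module indices with a per-module
-- selection of the matching notes (objective: alternative decomposition, not faster).

-- ===== PORT A =====
-- one loop iteration of A: place note into its bucket (modules[m_idx].append with Python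
-- index semantics via pyGetD/pySetD; on an index Python would raise on, pySetD is a no-op —
-- those inputs are excluded by Pre_)
def stepA (module_size n_modules : Int) (mods : List (List (Int × Int × Int)))
    (note : Int × Int × Int) : List (List (Int × Int × Int)) :=
  let s := note.1
  let p := note.2.1
  let e := note.2.2
  let m_idx := PySem.Int.floordiv s module_size
  if m_idx ≥ n_modules then mods
  else
    let m_start := s - m_idx * module_size
    let m_end := min (e - m_idx * module_size) module_size
    if m_end > m_start then
      PySem.List.pySetD mods m_idx (PySem.List.pyGetD mods m_idx [] ++ [(m_start, p, m_end)])
    else mods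

def split_into_modules (notes : List (Int × Int × Int)) (total_time : Int) (module_size : Int) : List (List (Int × Int × Int)) :=
  let n_modules := PySem.Int.floordiv total_time module_size
  let modules := (PySem.List.pyRange 0 n_modules 1).map (fun _ => ([] : List (Int × Int × Int)))
  notes.foldl (stepA module_size n_modules) modules

-- ===== PORT B =====
-- the inner comprehension of B: notes belonging to module m, offset into it
def selB (module_size m : Int) (notes : List (Int × Int × Int)) : List (Int × Int × Int) :=
  notes.filterMap (fun note =>
    let s := note.1
    let p := note.2.1
    let e := note.2.2
    if PySem.Int.floordiv s module_size = m ∧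
       min (e - m * module_size) module_size > s - m * module_size
    then some (s - m * module_size, p, min (e - m * module_size) module_size)
    else none)

def split_into_modules_alt (notes : List (Int × Int × Int)) (total_time : Int) (module_size : Int) : List (List (Int × Int × Int)) :=
  let n_modules := PySem.Int.floordiv total_time module_size
  (PySem.List.pyRange 0 n_modules 1).map (fun m => selB module_size m notes)

-- ===== PRECONDITION & SPEC =====
-- Pre_ excludes module_size = 0 (A raises ZeroDivisionError) and notes with a NEGATIVE module
-- index s // module_size whose clipped span is nonempty and whose index is below n_modules:
-- on those A either raises IndexError or appends the note to a bucket chosen by Python's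
-- negative-index wraparound — an accident of the indexed-append implementation (a note that
-- A's own guards skip stays inside Pre_ whatever its sign).
def Pre_split_into_modules (notes : List (Int × Int × Int)) (total_time : Int) (module_size : Int) : Prop :=
  module_size ≠ 0 ∧ ∀ x ∈ notes, 0 ≤ PySem.Int.floordiv x.1 module_size ∨
    min (x.2.2 - (PySem.Int.floordiv x.1 module_size) * module_size) module_size ≤
      x.1 - (PySem.Int.floordiv x.1 module_size) * module_size ∨
    PySem.Int.floordiv total_time module_size ≤ PySem.Int.floordiv x.1 module_size
instance (notes : List (Int × Int × Int)) (total_time : Int) (module_size : Int) : Decidable (Pre_split_into_modules notes total_time module_size) := by unfold Pre_split_into_modules; infer_instance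

def pvWitness_split_into_modules : (List (Int × Int × Int)) × Int × Int :=
  ([(0, 60, 5), (33, 62, 40), (100, 64, 200), (33, 65, 33)], 96, 32)

def Spec_split_into_modules (notes : List (Int × Int × Int)) (total_time : Int) (module_size : Int) (out : List (List (Int × Int × Int))) : Prop := out = split_into_modules_alt notes total_time module_size
instance (notes : List (Int × Int × Int)) (total_time : Int) (module_size : Int) (out : List (List (Int × Int × Int))) : Decidable (Spec_split_into_modules notes total_time module_size out) := by unfold Spec_split_into_modules; infer_instance

-- ===== CLAIM (what is proved, stated in full; the proofs are below) =====
def Claim_equal_split_into_modules : Prop := ∀ (notes : List (Int × Int × Int)) (total_time : Int) (module_size : Int), Dom_split_into_modules notes total_time module_size → Pre_split_into_modules notes total_time module_size → Spec_split_into_modules notes total_time module_size (split_into_modules notes total_time module_size)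

-- ===== LEMMAS AND PROOFS =====

-- selB on a cons: the head note contributes exactly when its module is m and the clip is nonempty
lemma selB_cons (ms m : Int) (x : Int × Int × Int) (rest : List (Int × Int × Int)) :
    selB ms m (x :: rest) =
      (if PySem.Int.floordiv x.1 ms = m ∧
          min (x.2.2 - m * ms) ms > x.1 - m * ms
       then [(x.1 - m * ms, x.2.1, min (x.2.2 - m * ms) ms)]
       else []) ++ selB ms m rest := by
  simp only [selB, List.filterMap_cons]
  split_ifs with h <;> simp

-- setting index m₀ of a map over range 0..nm is the map of the pointwise-updated function
lemma set_map_pyRange (nm m₀ : Int) (f : Int → List (Int × Int × Int))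
    (v : List (Int × Int × Int)) (h0 : 0 ≤ m₀) (_h1 : m₀ < nm) :
    PySem.List.pySetD ((PySem.List.pyRange 0 nm 1).map f) m₀ v =
      (PySem.List.pyRange 0 nm 1).map (fun m => if m = m₀ then v else f m) := by
  rw [PySem.List.pySetD_of_nonneg _ _ h0]
  apply List.ext_getElem
  · simp
  · intro k hk1 hk2
    simp only [List.getElem_set, List.getElem_map] at *
    have hklen : k < (PySem.List.pyRange 0 nm 1).length := by simpa using hk2
    have hkr : (PySem.List.pyRange 0 nm 1)[k] = (k : Int) := by
      rw [PySem.List.getElem_pyRange_one]; ring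
    rw [hkr]
    by_cases hb : (k : Int) = m₀
    · rw [if_pos (by omega : m₀.toNat = k), if_pos hb]
    · rw [if_neg (by omega : ¬ m₀.toNat = k), if_neg hb]

-- main invariant: folding A's step over notes, starting from per-module prefixes f m,
-- appends to each module exactly B's selection for that module
lemma fold_stepA (ms nm : Int) :
    ∀ (notes : List (Int × Int × Int)),
    (∀ x ∈ notes, 0 ≤ PySem.Int.floordiv x.1 ms ∨
      min (x.2.2 - (PySem.Int.floordiv x.1 ms) * ms) ms ≤
        x.1 - (PySem.Int.floordiv x.1 ms) * ms ∨
      nm ≤ PySem.Int.floordiv x.1 ms) →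
    ∀ (f : Int → List (Int × Int × Int)),
      notes.foldl (stepA ms nm) ((PySem.List.pyRange 0 nm 1).map f) =
        (PySem.List.pyRange 0 nm 1).map (fun m => f m ++ selB ms m notes) := by
  intro notes
  induction notes with
  | nil => intro _ f; simp [selB]
  | cons x rest ih =>
    intro hnn f
    have hx := hnn x (by simp)
    have hrest := fun y (hy : y ∈ rest) => hnn y (by simp [hy])
    set m₀ := PySem.Int.floordiv x.1 ms with hm₀
    simp only [List.foldl_cons]
    by_cases hge : m₀ ≥ nm
    · -- note skipped by A; it also matches no module m < nm in B
      have hstep : stepA ms nm ((PySem.List.pyRange 0 nm 1).map f) x =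
          (PySem.List.pyRange 0 nm 1).map f := by
        simp only [stepA, ← hm₀]
        rw [if_pos hge]
      rw [hstep, ih hrest f]
      apply List.map_congr_left
      intro m hm
      have hmlt : m < nm := (PySem.List.mem_pyRange_one.mp hm).2
      have hcond : ¬(PySem.Int.floordiv x.1 ms = m ∧
          min (x.2.2 - m * ms) ms > x.1 - m * ms) := by
        rintro ⟨h1, -⟩; omega
      rw [selB_cons, if_neg hcond]
      simp
    · rw [ge_iff_le, not_le] at hge
      by_cases hcl : min (x.2.2 - m₀ * ms) ms > x.1 - m₀ * ms
      · -- note appended to bucket m₀ (its start is nonnegative: the other Pre_ disjuncts fail)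
        have hm₀0 : 0 ≤ m₀ := by
          rcases hx with hx | hx | hx <;> omega
        have hstep : stepA ms nm ((PySem.List.pyRange 0 nm 1).map f) x =
            (PySem.List.pyRange 0 nm 1).map
              (fun m => if m = m₀ then f m₀ ++ [(x.1 - m₀ * ms, x.2.1, min (x.2.2 - m₀ * ms) ms)] else f m) := by
          simp only [stepA, ← hm₀]
          rw [if_neg (by omega), if_pos hcl,
            PySem.List.pyGetD_map_pyRange_of_nonneg f nm m₀ _ hm₀0 hge,
            set_map_pyRange nm m₀ f _ hm₀0 hge]
        rw [hstep, ih hrest]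
        apply List.map_congr_left
        intro m hm
        rw [selB_cons]
        by_cases hmm : m = m₀
        · subst hmm
          rw [if_pos rfl, if_pos ⟨hm₀.symm, hcl⟩]
          simp [List.append_assoc]
        · have hcond : ¬(PySem.Int.floordiv x.1 ms = m ∧
              min (x.2.2 - m * ms) ms > x.1 - m * ms) := by
            rintro ⟨h1, -⟩; exact hmm (hm₀.trans h1).symm
          rw [if_neg hmm, if_neg hcond]
          simp
      · -- clipped note empty: A skips, B's condition fails everywhere
        have hstep : stepA ms nm ((PySem.List.pyRange 0 nm 1).map f) x =
            (PySem.List.pyRange 0 nm 1).map f := by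
          simp only [stepA, ← hm₀]
          rw [if_neg (by omega), if_neg hcl]
        rw [hstep, ih hrest f]
        apply List.map_congr_left
        intro m hm
        have hcond : ¬(PySem.Int.floordiv x.1 ms = m ∧
            min (x.2.2 - m * ms) ms > x.1 - m * ms) := by
          rintro ⟨h1, h2⟩
          rw [← h1, ← hm₀] at h2
          exact hcl h2
        rw [selB_cons, if_neg hcond]
        simp

-- ===== VERDICT (by name: the statement is the Claim_ definition above) =====
theorem split_into_modules_spec : Claim_equal_split_into_modules := by
  intro notes total_time module_size _ hpre
  obtain ⟨-, hnn⟩ := hpre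
  unfold Spec_split_into_modules split_into_modules split_into_modules_alt
  rw [fold_stepA module_size (PySem.Int.floordiv total_time module_size) notes hnn
      (fun _ => [])]
  simp
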